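-- pv_equiv track=rewrite | github.com/carltonknox/TicTacToe | TTTGame.py | colScan
-- ===== SOURCE A (Python) =====
-- def colScan(board,col):
--     Xcount = 0
--     Ocount = 0
--     for row in range(0,3):
--         XO = board[row][col]
--         if XO == 'X':
--             Xcount+=1
--         elif XO == 'O':
--             Ocount+=1
--     return (Xcount,Ocount)
-- ===== SOURCE B (Python) =====
-- _TALLY = {'X': (1, 0), 'O': (0, 1)}
--
-- def colScan(board, col):
--     def go(row):
--         if row == 3:
--             return (0, 0)
--         dx, do = _TALLY.get(board[row][col], (0, 0))
--         rx, ro = go(row + 1)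
--         return (dx + rx, do + ro)
--     return go(0)
-- ===== Notes on version B (the rewrite author's own statement) =====
-- stated objective: alternative
-- what changed: Replaces the iterative if/elif counting loop over counters with a back-to-front recursion over rows that looks each cell's (dX,dO) contribution up in a dict table and vector-adds it to the tail's tally, so the per-cell branches and mutable accumulators are gone.
import Mathlib
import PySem

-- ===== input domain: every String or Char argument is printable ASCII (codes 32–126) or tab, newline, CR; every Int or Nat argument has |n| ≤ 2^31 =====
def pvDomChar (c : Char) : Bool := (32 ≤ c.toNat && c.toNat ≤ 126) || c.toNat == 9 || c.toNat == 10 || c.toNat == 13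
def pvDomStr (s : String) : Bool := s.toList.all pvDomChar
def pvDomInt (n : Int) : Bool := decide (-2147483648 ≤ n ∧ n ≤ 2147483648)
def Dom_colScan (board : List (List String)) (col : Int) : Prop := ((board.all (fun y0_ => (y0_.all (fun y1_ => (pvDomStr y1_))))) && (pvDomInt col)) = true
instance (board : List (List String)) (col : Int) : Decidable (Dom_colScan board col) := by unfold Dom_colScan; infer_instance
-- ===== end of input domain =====

-- B replaces A's iterative if/elif counting loop with a back-to-front recursion over rows that
-- looks each cell's (dX,dO) contribution up in a dict table and vector-adds it (objective: alternative).

-- ===== PORT A =====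
def colScan (board : List (List String)) (col : Int) : Int × Int :=
  (PySem.List.pyRange 0 3 1).foldl
    (fun (acc : Int × Int) row =>
      let XO := PySem.List.pyGetD (PySem.List.pyGetD board row []) col ""
      if XO = "X" then (acc.1 + 1, acc.2)
      else if XO = "O" then (acc.1, acc.2 + 1)
      else acc)
    (0, 0)

-- ===== PORT B =====
-- _TALLY = {'X': (1, 0), 'O': (0, 1)}
def colScanTally : PySem.Dict String (Int × Int) :=
  PySem.Dict.ofList [("X", ((1 : Int), (0 : Int))), ("O", (0, 1))]

-- go(row): Python stops at row == 3; the extra `row < 3` test only makes the recursion total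
def colScanGo (board : List (List String)) (col : Int) (row : Int) : Int × Int :=
  if row = 3 then (0, 0)
  else if _h : row < 3 then
    let d := PySem.Dict.getD colScanTally (PySem.List.pyGetD (PySem.List.pyGetD board row []) col "") (0, 0)
    let r := colScanGo board col (row + 1)
    (d.1 + r.1, d.2 + r.2)
  else (0, 0)
termination_by (3 - row).toNat
decreasing_by omega

def colScan_alt (board : List (List String)) (col : Int) : Int × Int :=
  colScanGo board col 0

-- ===== PRECONDITION & SPEC =====
-- Pre_: Python raises IndexError unless the board has at least 3 rows and col is a valid
-- (possibly negative) index into each of the first three rows.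
def Pre_colScan (board : List (List String)) (col : Int) : Prop :=
  3 ≤ board.length ∧ ∀ row ∈ board.take 3, PySem.Raise.InRange row.length col
instance (board : List (List String)) (col : Int) : Decidable (Pre_colScan board col) := by
  unfold Pre_colScan; infer_instance

def pvWitness_colScan : List (List String) × Int :=
  ([["X", "O"], ["O", "X"], ["", "X"]], 1)

def Spec_colScan (board : List (List String)) (col : Int) (out : Int × Int) : Prop := out = colScan_alt board col
instance (board : List (List String)) (col : Int) (out : Int × Int) : Decidable (Spec_colScan board col out) := by unfold Spec_colScan; infer_instance

-- ===== CLAIM (what is proved, stated in full; the proofs are below) =====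
def Claim_equal_colScan : Prop := ∀ (board : List (List String)) (col : Int), Dom_colScan board col → Pre_colScan board col → Spec_colScan board col (colScan board col)

-- ===== LEMMAS AND PROOFS =====
-- the tally table's lookup as an if-cascade on the key
def colScanT (a : String) : Int × Int :=
  if a = "X" then (1, 0) else if a = "O" then (0, 1) else (0, 0)

theorem tally_ins : colScanTally = (PySem.Dict.empty.insert "X" ((1:Int),(0:Int))).insert "O" ((0:Int),(1:Int)) := by rfl

theorem tally_getD (a : String) :
    PySem.Dict.getD colScanTally a (0, 0) = colScanT a := by
  rw [tally_ins]
  by_cases ha : a = "X" <;> by_cases hb : a = "O" <;>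
    simp_all [colScanT, PySem.Dict.getD_insert, PySem.Dict.getD_empty]

-- one step of A's loop, written as adding the table contribution
theorem stepA (a : String) (acc : Int × Int) :
    (if a = "X" then (acc.1 + 1, acc.2) else if a = "O" then (acc.1, acc.2 + 1) else acc)
      = ((colScanT a).1 + acc.1, (colScanT a).2 + acc.2) := by
  by_cases ha : a = "X" <;> by_cases hb : a = "O" <;>
    simp_all [colScanT, Prod.ext_iff] <;> omega

-- ===== VERDICT (by name: the statement is the Claim_ definition above) =====
theorem colScan_spec : Claim_equal_colScan := by
  intro board col _ _
  unfold Spec_colScan colScan colScan_alt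
  rw [show PySem.List.pyRange 0 3 1 = [0, 1, 2] from by decide]
  rw [colScanGo, colScanGo, colScanGo, colScanGo]
  norm_num [List.foldl, stepA, tally_getD]
  by_cases h2 : PySem.List.pyGetD (PySem.List.pyGetD board 2 []) col "" = "X" <;>
    by_cases h2' : PySem.List.pyGetD (PySem.List.pyGetD board 2 []) col "" = "O" <;>
      by_cases h0 : PySem.List.pyGetD (PySem.List.pyGetD board 0 []) col "" = "X" <;>
        by_cases h0' : PySem.List.pyGetD (PySem.List.pyGetD board 0 []) col "" = "O" <;>
          simp_all [colScanT, Prod.ext_iff] <;> (try constructor) <;> (try ring)
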